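-- pv_equiv track=rewrite | github.com/sohei-t/ai-agent-portfolio | learning-content-agent/src/rag_accuracy_test.py | generate_default_questions
-- ===== SOURCE A (Python) =====
-- def generate_default_questions(chunks: list) -> list:
--     """rag_test_questions.json がない場合のデフォルト質問を生成"""
--     questions = []
--
--     # チャンクのメタデータからトピックを抽出
--     topics = {}
--     for chunk in chunks:
--         meta = chunk["metadata"]
--         key = (meta.get("chapter", ""), meta.get("title", ""))
--         if key not in topics and key[1]:
--             topics[key] = meta
--
--     # 各トピックから1問ずつ
--     for (chapter, title), meta in list(topics.items())[:10]:
--         questions.append({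
--             "question": f"{title}について教えてください",
--             "category": "basic",
--             "expected_chapter": chapter,
--         })
--
--     # 範囲外質問
--     questions.append({
--         "question": "Pythonのクラスの書き方は？",
--         "category": "out_of_scope",
--     })
--
--     return questions
-- ===== SOURCE B (Python) =====
-- def generate_default_questions(chunks: list) -> list:
--     """rag_test_questions.json がない場合のデフォルト質問を生成"""
--     questions = []
--     seen = set()
--     for chunk in chunks:
--         if len(questions) >= 10:
--             break
--         meta = chunk["metadata"]
--         key = (meta.get("chapter", ""), meta.get("title", ""))
--         if key[1] and key not in seen:
--             seen.add(key)
--             questions.append({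
--                 "question": f"{key[1]}について教えてください",
--                 "category": "basic",
--                 "expected_chapter": key[0],
--             })
--     questions.append({
--         "question": "Pythonのクラスの書き方は？",
--         "category": "out_of_scope",
--     })
--     return questions
-- ===== Notes on version B (the rewrite author's own statement) =====
-- stated objective: alternative
-- what changed: Replaces A's two-pass structure (build a topics dict over all chunks, then slice its first 10 items and format them) with a single fused pass that keeps a seen-set, appends each formatted question immediately at its key's first occurrence, and breaks as soon as 10 questions exist.
import Mathlib
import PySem

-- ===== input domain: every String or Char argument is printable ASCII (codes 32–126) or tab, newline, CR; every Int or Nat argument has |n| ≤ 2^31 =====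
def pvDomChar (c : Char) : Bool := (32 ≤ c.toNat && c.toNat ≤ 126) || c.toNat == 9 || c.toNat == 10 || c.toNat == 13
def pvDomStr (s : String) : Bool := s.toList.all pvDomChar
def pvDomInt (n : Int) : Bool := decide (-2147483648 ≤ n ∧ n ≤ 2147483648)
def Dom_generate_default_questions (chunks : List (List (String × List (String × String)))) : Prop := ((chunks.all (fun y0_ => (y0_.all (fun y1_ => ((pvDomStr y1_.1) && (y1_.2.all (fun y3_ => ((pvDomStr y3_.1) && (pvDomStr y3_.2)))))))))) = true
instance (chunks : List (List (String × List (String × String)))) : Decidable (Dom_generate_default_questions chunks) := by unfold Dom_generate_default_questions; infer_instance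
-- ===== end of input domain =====

-- B fuses A's two passes (build a topics dict, then format the first 10 items) into one pass with a
-- seen-set and an early break once 10 questions are collected; same return value on Pre_ (alternative decomposition).


-- ===== PORT A =====
-- the fixed out-of-scope question appended at the end
def gdqOOS : List (String × String) :=
  [("question", "Pythonのクラスの書き方は？"), ("category", "out_of_scope")]

-- the formatted basic question for a (chapter, title) topic
def gdqFmt (chapter title : String) : List (String × String) :=
  [("question", title ++ "について教えてください"), ("category", "basic"), ("expected_chapter", chapter)]

def generate_default_questions (chunks : List (List (String × List (String × String)))) : List (List (String × String)) :=
  -- topics = {}; for chunk in chunks: …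
  let topics : PySem.Dict (String × String) (List (String × String)) :=
    chunks.foldl (fun topics chunk =>
      match (PySem.Dict.mk chunk).get? "metadata" with
      | none => topics          -- Python raises KeyError here (excluded by Pre_)
      | some md =>
        let key := ((PySem.Dict.mk md).getD "chapter" "", (PySem.Dict.mk md).getD "title" "")
        if !(topics.contains key) && key.2 != "" then topics.insert key md else topics)
      PySem.Dict.empty
  -- for (chapter, title), md in list(topics.items())[:10]: questions.append(…)
  let questions := (PySem.List.slice topics.items none (some 10)).map (fun p => gdqFmt p.1.1 p.1.2)
  questions ++ [gdqOOS]

-- ===== PORT B =====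
-- one pass: seen-set + questions accumulator, break at 10, then the out-of-scope question
def gdqGo : List (List (String × List (String × String))) → PySem.Set (String × String) → List (List (String × String)) → List (List (String × String))
  | [], _, qs => qs ++ [gdqOOS]
  | chunk :: rest, seen, qs =>
    if 10 ≤ qs.length then qs ++ [gdqOOS]   -- break
    else
      match (PySem.Dict.mk chunk).get? "metadata" with
      | none => gdqGo rest seen qs          -- Python raises KeyError here (excluded by Pre_)
      | some md =>
        let key := ((PySem.Dict.mk md).getD "chapter" "", (PySem.Dict.mk md).getD "title" "")
        if key.2 ≠ "" ∧ ¬ key ∈ seen then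
          gdqGo rest (PySem.Set.add seen key) (qs ++ [gdqFmt key.1 key.2])
        else gdqGo rest seen qs

def generate_default_questions_alt (chunks : List (List (String × List (String × String)))) : List (List (String × String)) :=
  gdqGo chunks PySem.Set.empty []

-- ===== PRECONDITION & SPEC =====
-- Pre_ excludes exactly the chunks lacking a "metadata" key, on which Python A (and B) raise KeyError.
def Pre_generate_default_questions (chunks : List (List (String × List (String × String)))) : Prop :=
  ∀ chunk ∈ chunks, ∃ p ∈ chunk, p.1 = "metadata"
instance (chunks : List (List (String × List (String × String)))) : Decidable (Pre_generate_default_questions chunks) := by unfold Pre_generate_default_questions; infer_instance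

def pvWitness_generate_default_questions : (List (List (String × List (String × String)))) :=
  [[("metadata", [("chapter", "1"), ("title", "Intro")])]]

def Spec_generate_default_questions (chunks : List (List (String × List (String × String)))) (out : List (List (String × String))) : Prop := out = generate_default_questions_alt chunks
instance (chunks : List (List (String × List (String × String)))) (out : List (List (String × String))) : Decidable (Spec_generate_default_questions chunks out) := by unfold Spec_generate_default_questions; infer_instance

-- ===== CLAIM (what is proved, stated in full; the proofs are below) =====
def Claim_equal_generate_default_questions : Prop := ∀ (chunks : List (List (String × List (String × String)))), Dom_generate_default_questions chunks → Pre_generate_default_questions chunks → Spec_generate_default_questions chunks (generate_default_questions chunks)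

-- ===== LEMMAS AND PROOFS =====

-- reference: the ordered first occurrences of valid (chapter, title) keys not in `seen`
def gdqKeys : List (List (String × List (String × String))) → List (String × String) → List (String × String)
  | [], _ => []
  | chunk :: rest, seen =>
    match (PySem.Dict.mk chunk).get? "metadata" with
    | none => gdqKeys rest seen
    | some md =>
      let key := ((PySem.Dict.mk md).getD "chapter" "", (PySem.Dict.mk md).getD "title" "")
      if key.2 ≠ "" ∧ ¬ key ∈ seen then key :: gdqKeys rest (seen ++ [key]) else gdqKeys rest seen

theorem gdq_keys_foldl (chunks : List (List (String × List (String × String)))) :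
    ∀ d : PySem.Dict (String × String) (List (String × String)),
    (chunks.foldl (fun topics chunk =>
      match (PySem.Dict.mk chunk).get? "metadata" with
      | none => topics
      | some md =>
        let key := ((PySem.Dict.mk md).getD "chapter" "", (PySem.Dict.mk md).getD "title" "")
        if !(topics.contains key) && key.2 != "" then topics.insert key md else topics) d).keys
      = d.keys ++ gdqKeys chunks d.keys := by
  induction chunks with
  | nil => intro d; simp [gdqKeys]
  | cons chunk rest ih =>
    intro d
    simp only [List.foldl_cons, gdqKeys]
    cases (PySem.Dict.mk chunk).get? "metadata" with
    | none => exact ih d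
    | some md =>
      simp only []
      set key := ((PySem.Dict.mk md).getD "chapter" "", (PySem.Dict.mk md).getD "title" "") with hkey
      by_cases hc : key.2 ≠ "" ∧ ¬ key ∈ d.keys
      · have hcont : d.contains key = false := by
          rcases h : d.contains key
          · rfl
          · exact absurd ((PySem.Dict.contains_iff_mem_keys d key).mp h) hc.2
        have hb : (!(d.contains key) && key.2 != "") = true := by
          simp [hcont, hc.1]
        rw [if_pos hb, if_pos hc, ih]
        rw [PySem.Dict.keys_insert_of_not_contains _ _ hcont]
        simp only [List.append_assoc, List.cons_append, List.nil_append]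
        rfl
      · have hb : ¬ ((!(d.contains key) && key.2 != "") = true) := by
          intro h
          simp only [Bool.and_eq_true, Bool.not_eq_true', bne_iff_ne] at h
          exact hc ⟨h.2, fun hm => by
            have := (PySem.Dict.contains_iff_mem_keys d key).mpr hm
            rw [this] at h
            exact absurd h.1 (by simp)⟩
        rw [if_neg hb, if_neg hc]
        exact ih d

theorem gdq_A_eq (chunks : List (List (String × List (String × String)))) :
    generate_default_questions chunks
      = ((gdqKeys chunks []).take 10).map (fun k => gdqFmt k.1 k.2) ++ [gdqOOS] := by
  unfold generate_default_questions
  have hslice : ∀ (xs : List ((String × String) × List (String × String))),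
      PySem.List.slice xs none (some 10) = xs.take 10 := by
    intro xs
    exact_mod_cast PySem.List.slice_to_natCast xs 10
  simp only [hslice]
  have hkeys := gdq_keys_foldl chunks PySem.Dict.empty
  simp only [PySem.Dict.keys_empty, List.nil_append] at hkeys
  have : ((chunks.foldl (fun topics chunk =>
      match (PySem.Dict.mk chunk).get? "metadata" with
      | none => topics
      | some md =>
        let key := ((PySem.Dict.mk md).getD "chapter" "", (PySem.Dict.mk md).getD "title" "")
        if !(topics.contains key) && key.2 != "" then topics.insert key md else topics)
      PySem.Dict.empty).items.take 10).map (fun p => gdqFmt p.1.1 p.1.2)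
      = ((gdqKeys chunks []).take 10).map (fun k => gdqFmt k.1 k.2) := by
    rw [← hkeys]
    simp only [PySem.Dict.keys, ← List.map_take, List.map_map]
    rfl
  rw [this]

theorem gdq_B_eq (chunks : List (List (String × List (String × String)))) :
    ∀ (seen : PySem.Set (String × String)) (qs : List (List (String × String))), seen.Nodup →
    gdqGo chunks seen qs
      = qs ++ ((gdqKeys chunks seen).take (10 - qs.length)).map (fun k => gdqFmt k.1 k.2) ++ [gdqOOS] := by
  induction chunks with
  | nil => intro seen qs _; simp [gdqGo, gdqKeys]
  | cons chunk rest ih =>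
    intro seen qs hnd
    simp only [gdqGo, gdqKeys]
    by_cases hlen : 10 ≤ qs.length
    · rw [if_pos hlen]
      have : 10 - qs.length = 0 := by omega
      simp [this]
    · rw [if_neg hlen]
      cases (PySem.Dict.mk chunk).get? "metadata" with
      | none => exact ih seen qs hnd
      | some md =>
        simp only []
        set key := ((PySem.Dict.mk md).getD "chapter" "", (PySem.Dict.mk md).getD "title" "") with hkey
        by_cases hc : key.2 ≠ "" ∧ ¬ key ∈ seen
        · rw [if_pos hc, if_pos hc]
          rw [ih _ _ (PySem.Set.nodup_add seen key hnd)]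
          rw [PySem.Set.add_of_not_mem hc.2]
          have hn : 10 - qs.length = (10 - (qs ++ [gdqFmt key.1 key.2]).length) + 1 := by
            simp only [List.length_append, List.length_cons, List.length_nil]
            omega
          rw [hn, List.take_succ_cons]
          simp only [List.map_cons, List.append_assoc, List.cons_append, List.nil_append]
          rfl
        · rw [if_neg hc, if_neg hc]
          exact ih seen qs hnd

-- ===== VERDICT (by name: the statement is the Claim_ definition above) =====
theorem generate_default_questions_spec : Claim_equal_generate_default_questions := by
  intro chunks _ _
  unfold Spec_generate_default_questions generate_default_questions_alt
  rw [gdq_A_eq, gdq_B_eq chunks PySem.Set.empty [] List.nodup_nil]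
  simp [PySem.Set.empty]
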